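-- pv_equiv track=rewrite | github.com/maomihz/kattis | src/selectgroup/selectgroup.py | evaluate
-- ===== SOURCE A (Python) =====
-- def evaluate(groups, words):
--     oplist = {
--         'union': lambda x, y: x | y,
--         'intersection': lambda x, y: x & y,
--         'difference': lambda x, y: x - y
--     }
--
--     items = list()
--
--     for w in reversed(words):
--         if w in oplist:
--             a = items.pop()
--             b = items.pop()
--             items.append(oplist[w](a, b))
--         else:
--             items.append(groups[w])
--     return items.pop()
-- ===== SOURCE B (Python) =====
-- def evaluate(groups, words):
--     ops = {
--         'union': lambda x, y: x | y,
--         'intersection': lambda x, y: x & y,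
--         'difference': lambda x, y: x - y
--     }
--
--     def parse(i):
--         # evaluate the prefix expression starting at words[i];
--         # return (value, index just past it)
--         w = words[i]
--         if w in ops:
--             x, j = parse(i + 1)
--             y, k = parse(j)
--             return ops[w](x, y), k
--         return groups[w], i + 1
--
--     return parse(0)[0]
-- ===== Notes on version B (the rewrite author's own statement) =====
-- stated objective: alternative
-- what changed: Replaces the reversed-order explicit stack with a one-pass left-to-right recursive-descent evaluator that returns (value, next index) for each prefix sub-expression.
import Mathlib
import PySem

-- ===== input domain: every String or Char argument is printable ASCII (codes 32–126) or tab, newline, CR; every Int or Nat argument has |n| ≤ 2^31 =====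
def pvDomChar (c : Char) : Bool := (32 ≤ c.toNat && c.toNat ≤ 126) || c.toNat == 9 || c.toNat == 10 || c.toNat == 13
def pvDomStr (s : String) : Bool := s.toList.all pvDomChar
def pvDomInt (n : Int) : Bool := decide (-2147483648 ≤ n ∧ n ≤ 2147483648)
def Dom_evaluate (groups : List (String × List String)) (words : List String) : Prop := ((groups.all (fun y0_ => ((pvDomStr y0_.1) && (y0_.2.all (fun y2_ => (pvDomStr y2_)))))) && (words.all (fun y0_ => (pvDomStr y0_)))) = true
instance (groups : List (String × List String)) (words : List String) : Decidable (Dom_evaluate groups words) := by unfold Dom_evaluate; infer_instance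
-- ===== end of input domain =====

-- B replaces A's reversed-order explicit stack by a left-to-right recursive-descent
-- evaluator (objective: alternative decomposition, same cost).

-- ===== PORT A =====
-- shared vocabulary of both Pythons: the three-operator table
def pvIsOp (w : String) : Bool := w == "union" || w == "intersection" || w == "difference"

def pvApplyOp (w : String) (x y : PySem.Set String) : PySem.Set String :=
  if w == "union" then PySem.Set.union x y
  else if w == "intersection" then PySem.Set.inter x y
  else PySem.Set.diff x y

-- the loop 'for w in reversed(words)': items is the stack (head = top);
-- none = IndexError (pop on short stack) or KeyError (groups[w] missing)
def evalStackA (groups : List (String × List String)) :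
    List String → List (List String) → Option (List (List String))
  | [], items => some items
  | w :: rest, items =>
    if pvIsOp w then
      match items with
      | a :: b :: items' => evalStackA groups rest (pvApplyOp w a b :: items')
      | _ => none
    else
      match PySem.Dict.get? (PySem.Dict.mk groups) w with
      | some v => evalStackA groups rest (v :: items)
      | none => none

def evaluate (groups : List (String × List String)) (words : List String) : List String :=
  ((evalStackA groups words.reverse []).bind List.head?).getD []

-- ===== PORT B =====
-- B's parse(i): evaluate the prefix expression at the front of the remaining words,
-- return (value, remaining words). Fuel (first argument) only makes the recursion
-- structural; words.length is always enough fuel on inputs where B returns.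
def parseB (groups : List (String × List String)) :
    Nat → List String → Option (List String × List String)
  | 0, _ => none
  | _ + 1, [] => none
  | n + 1, w :: rest =>
    if pvIsOp w then
      match parseB groups n rest with
      | some (x, r1) =>
        match parseB groups n r1 with
        | some (y, r2) => some (pvApplyOp w x y, r2)
        | none => none
      | none => none
    else
      match PySem.Dict.get? (PySem.Dict.mk groups) w with
      | some v => some (v, rest)
      | none => none

def evaluate_alt (groups : List (String × List String)) (words : List String) : List String :=
  ((parseB groups words.length words).map Prod.fst).getD []

-- ===== PRECONDITION & SPEC =====
-- leaves-minus-operators balance of a token list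
def pvBal (ws : List String) : Int :=
  (ws.countP (fun w => !pvIsOp w) : Int) - (ws.countP (fun w => pvIsOp w) : Int)

-- Pre_ = exactly the inputs on which Python A returns: words nonempty, every word is an
-- operator or a key of groups, and every suffix has more leaves than operators (so the
-- reversed-order stack never underflows and is nonempty at the end).
def Pre_evaluate (groups : List (String × List String)) (words : List String) : Prop :=
  words ≠ [] ∧
  (∀ w ∈ words, pvIsOp w = true ∨ (PySem.Dict.get? (PySem.Dict.mk groups) w).isSome = true) ∧
  (∀ i, i < words.length → 1 ≤ pvBal (words.drop i))

instance (groups : List (String × List String)) (words : List String) : Decidable (Pre_evaluate groups words) := by unfold Pre_evaluate; infer_instance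

def pvWitness_evaluate : (List (String × List String)) × List String :=
  ([("a", ["x", "y"]), ("b", ["y"])], ["difference", "a", "b"])

def Spec_evaluate (groups : List (String × List String)) (words : List String) (out : List String) : Prop := out = evaluate_alt groups words
instance (groups : List (String × List String)) (words : List String) (out : List String) : Decidable (Spec_evaluate groups words out) := by unfold Spec_evaluate; infer_instance

-- ===== CLAIM (what is proved, stated in full; the proofs are below) =====
def Claim_equal_evaluate : Prop := ∀ (groups : List (String × List String)) (words : List String), Dom_evaluate groups words → Pre_evaluate groups words → Spec_evaluate groups words (evaluate groups words)

-- ===== LEMMAS AND PROOFS =====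

theorem evalStackA_append (groups : List (String × List String)) (l1 l2 : List String)
    (items : List (List String)) :
    evalStackA groups (l1 ++ l2) items
      = (evalStackA groups l1 items).bind (fun s => evalStackA groups l2 s) := by
  induction l1 generalizing items with
  | nil => simp [evalStackA]
  | cons w t ih =>
    simp only [List.cons_append, evalStackA]
    split
    · match items with
      | a :: b :: items' => exact ih _
      | [] => rfl
      | [a] => rfl
    · cases PySem.Dict.get? (PySem.Dict.mk groups) w with
      | some v => exact ih _
      | none => rfl

theorem pvBal_cons (w : String) (t : List String) :
    pvBal (w :: t) = (if pvIsOp w then pvBal t - 1 else pvBal t + 1) := by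
  simp only [pvBal, List.countP_cons]
  by_cases h : pvIsOp w = true <;> simp [h] <;> omega

theorem pvBal_append (l1 l2 : List String) : pvBal (l1 ++ l2) = pvBal l1 + pvBal l2 := by
  simp only [pvBal, List.countP_append]
  push_cast; ring

theorem pvBal_nil : pvBal [] = 0 := rfl

-- main invariant: under the precondition, B's parser succeeds on the leading prefix
-- expression pre, and pushing reversed(pre) through A's stack pushes exactly B's value.
theorem parse_main (groups : List (String × List String)) :
    ∀ n ws, ws.length ≤ n → ws ≠ [] →
      (∀ w ∈ ws, pvIsOp w = true ∨ (PySem.Dict.get? (PySem.Dict.mk groups) w).isSome = true) →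
      (∀ i, i < ws.length → 1 ≤ pvBal (ws.drop i)) →
      ∃ v pre rest, parseB groups n ws = some (v, rest) ∧ ws = pre ++ rest ∧ pvBal pre = 1 ∧
        (∀ st, evalStackA groups pre.reverse st = some (v :: st)) := by
  intro n
  induction n with
  | zero =>
    intro ws hlen hne _ _
    cases ws with
    | nil => exact absurd rfl hne
    | cons w t => simp at hlen
  | succ n ih =>
    intro ws hlen hne hkey hbal
    cases ws with
    | nil => exact absurd rfl hne
    | cons w t =>
      by_cases hop : pvIsOp w = true
      · -- operator: two recursive parses
        have hbal0 := hbal 0 (by simp)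
        rw [List.drop_zero, pvBal_cons, if_pos hop] at hbal0
        have hbt : 2 ≤ pvBal t := by omega
        have htne : t ≠ [] := by
          intro h; rw [h, pvBal_nil] at hbt; omega
        have hkt : ∀ x ∈ t, pvIsOp x = true ∨ (PySem.Dict.get? (PySem.Dict.mk groups) x).isSome = true := by
          intro x hx; exact hkey x (List.mem_cons_of_mem _ hx)
        have hbt' : ∀ i, i < t.length → 1 ≤ pvBal (t.drop i) := by
          intro i hi
          have := hbal (i + 1) (by simpa using Nat.succ_lt_succ hi)
          simpa using this
        obtain ⟨v1, pre1, r1, hp1, heq1, hb1, hs1⟩ :=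
          ih t (by simpa using Nat.le_of_succ_le_succ hlen) htne hkt hbt'
        -- balance of r1
        have hbr1 : 1 ≤ pvBal r1 := by
          have : pvBal t = pvBal pre1 + pvBal r1 := by rw [heq1, pvBal_append]
          omega
        have hr1ne : r1 ≠ [] := by
          intro h; rw [h, pvBal_nil] at hbr1; omega
        have hpre1ne : pre1 ≠ [] := by
          intro h; rw [h] at hb1; exact absurd hb1 (by simp [pvBal_nil])
        have hr1len : r1.length ≤ n := by
          have h1 : t.length = pre1.length + r1.length := by rw [heq1, List.length_append]
          have h2 : 1 ≤ pre1.length := List.length_pos_of_ne_nil hpre1ne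
          have h3 : t.length ≤ n := by simpa using Nat.le_of_succ_le_succ hlen
          omega
        have hkr1 : ∀ x ∈ r1, pvIsOp x = true ∨ (PySem.Dict.get? (PySem.Dict.mk groups) x).isSome = true := by
          intro x hx; exact hkt x (heq1 ▸ List.mem_append_right _ hx)
        have hbr1' : ∀ i, i < r1.length → 1 ≤ pvBal (r1.drop i) := by
          intro i hi
          have hdrop : t.drop (pre1.length + i) = r1.drop i := by
            rw [heq1, List.drop_length_add_append]
          have hlt : pre1.length + i < t.length := by
            have : t.length = pre1.length + r1.length := by rw [heq1, List.length_append]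
            omega
          have := hbt' (pre1.length + i) hlt
          rwa [hdrop] at this
        obtain ⟨v2, pre2, r2, hp2, heq2, hb2, hs2⟩ := ih r1 hr1len hr1ne hkr1 hbr1'
        refine ⟨pvApplyOp w v1 v2, w :: (pre1 ++ pre2), r2, ?_, ?_, ?_, ?_⟩
        · simp [parseB, hop, hp1, hp2]
        · simp [heq1, heq2, List.append_assoc]
        · rw [pvBal_cons, if_pos hop, pvBal_append]; omega
        · intro st
          have : (w :: (pre1 ++ pre2)).reverse = pre2.reverse ++ (pre1.reverse ++ [w]) := by
            simp
          rw [this, evalStackA_append, hs2, Option.bind_some, evalStackA_append, hs1,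
            Option.bind_some]
          simp [evalStackA, hop]
      · -- leaf: dictionary lookup
        have hv : (PySem.Dict.get? (PySem.Dict.mk groups) w).isSome = true := by
          rcases hkey w List.mem_cons_self with h | h
          · exact absurd h hop
          · exact h
        obtain ⟨v, hv⟩ := Option.isSome_iff_exists.mp hv
        refine ⟨v, [w], t, ?_, by simp, ?_, ?_⟩
        · simp [parseB, hop, hv]
        · simp [pvBal_cons, pvBal_nil, hop]
        · intro st
          simp [evalStackA, hop, hv]

-- the whole stack run: the final stack's head is B's value for the leading expression
theorem stack_top (groups : List (String × List String)) :
    ∀ N ws, ws.length ≤ N → ws ≠ [] →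
      (∀ w ∈ ws, pvIsOp w = true ∨ (PySem.Dict.get? (PySem.Dict.mk groups) w).isSome = true) →
      (∀ i, i < ws.length → 1 ≤ pvBal (ws.drop i)) →
      ∃ v rest st, parseB groups ws.length ws = some (v, rest) ∧
        evalStackA groups ws.reverse [] = some (v :: st) := by
  intro N
  induction N with
  | zero =>
    intro ws hlen hne _ _
    cases ws with
    | nil => exact absurd rfl hne
    | cons w t => simp at hlen
  | succ N ih =>
    intro ws hlen hne hkey hbal
    obtain ⟨v, pre, rest, hp, heq, hb, hs⟩ :=
      parse_main groups ws.length ws le_rfl hne hkey hbal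
    have hpre_ne : pre ≠ [] := by
      intro h; rw [h] at hb; exact absurd hb (by simp [pvBal_nil])
    by_cases hrest : rest = []
    · subst hrest
      refine ⟨v, [], [], by simpa using hp, ?_⟩
      have : ws.reverse = pre.reverse := by rw [heq]; simp
      rw [this, hs]
    · -- junk after the first expression: the stack still holds its values below
      have hlenrest : rest.length ≤ N := by
        have h1 : ws.length = pre.length + rest.length := by rw [heq, List.length_append]
        have h2 : 1 ≤ pre.length := List.length_pos_of_ne_nil hpre_ne
        omega
      have hkr : ∀ x ∈ rest, pvIsOp x = true ∨ (PySem.Dict.get? (PySem.Dict.mk groups) x).isSome = true := by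
        intro x hx; exact hkey x (heq ▸ List.mem_append_right _ hx)
      have hbr : ∀ i, i < rest.length → 1 ≤ pvBal (rest.drop i) := by
        intro i hi
        have hdrop : ws.drop (pre.length + i) = rest.drop i := by
          rw [heq, List.drop_length_add_append]
        have hlt : pre.length + i < ws.length := by
          have : ws.length = pre.length + rest.length := by rw [heq, List.length_append]
          omega
        have := hbal (pre.length + i) hlt
        rwa [hdrop] at this
      obtain ⟨v', rest', st', _, hstack'⟩ := ih rest hlenrest hrest hkr hbr
      refine ⟨v, rest, v' :: st', hp, ?_⟩
      have hrev : ws.reverse = rest.reverse ++ pre.reverse := by rw [heq]; simp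
      rw [hrev, evalStackA_append, hstack', Option.bind_some, hs]

-- ===== VERDICT (by name: the statement is the Claim_ definition above) =====
theorem evaluate_spec : Claim_equal_evaluate := by
  intro groups words _ hpre
  obtain ⟨hne, hkey, hbal⟩ := hpre
  obtain ⟨v, rest, st, hp, hstack⟩ :=
    stack_top groups words.length words le_rfl hne hkey hbal
  unfold Spec_evaluate evaluate evaluate_alt
  rw [hstack, hp]
  rfl
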